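-- pv_equiv track=rewrite | github.com/luiscarlosgarzacisneros/EFInformatik | docs/Dame3.py | verloren
-- ===== SOURCE A (Python) =====
-- def verloren(pos,otherplayer1, otherplayer2):
--     eval=0
--     for sl in range(len(pos)):
--         for o in range(pos[sl].count(otherplayer1)):
--             eval=eval+1
--         for p in range(pos[sl].count(otherplayer2)):
--             eval=eval+1
--     if eval==0:
--         return True
--     else:
--         return False
-- ===== SOURCE B (Python) =====
-- def verloren(pos, otherplayer1, otherplayer2):
--     return not any(otherplayer1 in row or otherplayer2 in row for row in pos)
-- ===== Notes on version B (the rewrite author's own statement) =====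
-- stated objective: simpler
-- what changed: Replaces the count-every-cell-then-compare-to-zero accumulator (with inner loops incrementing once per occurrence) by a single short-circuiting existence test over rows.
import Mathlib
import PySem

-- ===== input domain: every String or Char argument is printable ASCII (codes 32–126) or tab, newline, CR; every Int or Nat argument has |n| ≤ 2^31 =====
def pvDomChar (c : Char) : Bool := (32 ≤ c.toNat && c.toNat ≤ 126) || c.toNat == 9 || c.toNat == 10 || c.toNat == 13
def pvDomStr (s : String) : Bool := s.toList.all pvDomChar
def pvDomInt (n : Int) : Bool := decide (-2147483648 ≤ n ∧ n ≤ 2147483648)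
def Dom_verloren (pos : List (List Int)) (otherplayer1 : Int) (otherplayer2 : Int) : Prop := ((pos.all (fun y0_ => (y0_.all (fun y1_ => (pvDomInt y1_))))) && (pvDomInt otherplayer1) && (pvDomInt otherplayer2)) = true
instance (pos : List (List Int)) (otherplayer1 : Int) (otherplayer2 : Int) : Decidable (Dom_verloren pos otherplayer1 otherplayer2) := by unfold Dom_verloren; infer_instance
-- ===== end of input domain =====

-- B replaces A's count-everything-then-test-zero accumulator by a short-circuiting existence check (objective: simpler).

-- ===== PORT A =====
def verloren (pos : List (List Int)) (otherplayer1 : Int) (otherplayer2 : Int) : Bool :=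
  if ((PySem.List.pyRange 0 (PySem.List.len pos) 1).foldl
      (fun ev sl =>
        let row := PySem.List.pyGetD pos sl []
        let ev := (List.range (PySem.List.count row otherplayer1)).foldl (fun e _ => e + 1) ev
        (List.range (PySem.List.count row otherplayer2)).foldl (fun e _ => e + 1) ev)
      (0 : Int)) == 0 then true else false

-- ===== PORT B =====
def verloren_alt (pos : List (List Int)) (otherplayer1 : Int) (otherplayer2 : Int) : Bool :=
  !(pos.any (fun row => row.contains otherplayer1 || row.contains otherplayer2))

-- ===== PRECONDITION & SPEC =====
def Spec_verloren (pos : List (List Int)) (otherplayer1 : Int) (otherplayer2 : Int) (out : Bool) : Prop := out = verloren_alt pos otherplayer1 otherplayer2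
instance (pos : List (List Int)) (otherplayer1 : Int) (otherplayer2 : Int) (out : Bool) : Decidable (Spec_verloren pos otherplayer1 otherplayer2 out) := by unfold Spec_verloren; infer_instance

-- ===== CLAIM (what is proved, stated in full; the proofs are below) =====
def Claim_equal_verloren : Prop := ∀ (pos : List (List Int)) (otherplayer1 : Int) (otherplayer2 : Int), Dom_verloren pos otherplayer1 otherplayer2 → Spec_verloren pos otherplayer1 otherplayer2 (verloren pos otherplayer1 otherplayer2)

-- ===== LEMMAS AND PROOFS =====

-- adding 1 for each element of range n adds n
theorem foldl_range_add_one (n : Nat) (e : Int) :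
    (List.range n).foldl (fun e _ => e + 1) e = e + n := by
  induction n generalizing e with
  | zero => simp
  | succ k ih => simp [List.range_succ, ih]; ring

-- the accumulator's value is the starting value plus the total count
theorem verloren_foldl_eq (pos : List (List Int)) (p1 p2 : Int) (e : Int) :
    pos.foldl
      (fun ev row =>
        (List.range (PySem.List.count row p2)).foldl (fun e _ => e + 1)
          ((List.range (PySem.List.count row p1)).foldl (fun e _ => e + 1) ev)) e
    = e + ((pos.map (fun row => (PySem.List.count row p1 + PySem.List.count row p2 : Int))).sum) := by
  induction pos generalizing e with
  | nil => simp
  | cons row rest ih =>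
      rw [List.foldl_cons, ih]
      rw [foldl_range_add_one, foldl_range_add_one]
      simp only [List.map_cons, List.sum_cons]
      ring

-- a list of nonnegative terms sums to 0 iff every term is 0; specialised to the two counts
theorem sum_counts_zero_iff (pos : List (List Int)) (p1 p2 : Int) :
    ((pos.map (fun row => (PySem.List.count row p1 + PySem.List.count row p2 : Int))).sum = 0)
    ↔ pos.any (fun row => row.contains p1 || row.contains p2) = false := by
  induction pos with
  | nil => simp
  | cons row rest ih =>
      have hrest : 0 ≤ ((rest.map (fun row => (PySem.List.count row p1 + PySem.List.count row p2 : Int))).sum) :=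
        List.sum_nonneg (by intro x hx; simp at hx; obtain ⟨r, _, rfl⟩ := hx; positivity)
      simp only [List.map_cons, List.sum_cons, List.any_cons, Bool.or_eq_false_iff, ← ih]
      constructor
      · intro h
        have h1 : (PySem.List.count row p1 : Int) = 0 ∧ (PySem.List.count row p2 : Int) = 0 ∧
            ((rest.map (fun row => (PySem.List.count row p1 + PySem.List.count row p2 : Int))).sum) = 0 := by
          constructor; · omega
          constructor; · omega
          omega
        refine ⟨⟨?_, ?_⟩, h1.2.2⟩
        · simp [PySem.List.count_eq] at h1
          simp [List.count_eq_zero] at h1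
          simp [h1.1]
        · simp [PySem.List.count_eq] at h1
          simp [List.count_eq_zero] at h1
          simp [h1.2.1]
      · rintro ⟨⟨hc1, hc2⟩, hs⟩
        have m1 : p1 ∉ row := by simpa using hc1
        have m2 : p2 ∉ row := by simpa using hc2
        have c1 : (PySem.List.count row p1 : Int) = 0 := by
          simp [PySem.List.count_eq, List.count_eq_zero.mpr m1]
        have c2 : (PySem.List.count row p2 : Int) = 0 := by
          simp [PySem.List.count_eq, List.count_eq_zero.mpr m2]
        rw [c1, c2, hs]; ring

theorem verloren_spec_aux (pos : List (List Int)) (p1 p2 : Int) :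
    verloren pos p1 p2 = verloren_alt pos p1 p2 := by
  unfold verloren verloren_alt
  rw [PySem.List.foldl_pyRange_zero_pyGetD pos ([] : List Int)
        (fun ev row =>
          (List.range (PySem.List.count row p2)).foldl (fun e _ => e + 1)
            ((List.range (PySem.List.count row p1)).foldl (fun e _ => e + 1) ev)) 0]
  rw [verloren_foldl_eq, zero_add]
  rcases Bool.eq_false_or_eq_true (pos.any (fun row => row.contains p1 || row.contains p2)) with hany | hany
  · have hne : ((pos.map (fun row => (PySem.List.count row p1 + PySem.List.count row p2 : Int))).sum) ≠ 0 := by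
      intro h0
      rw [(sum_counts_zero_iff pos p1 p2).mp h0] at hany
      exact Bool.false_ne_true hany
    rw [hany, if_neg (by simp only [beq_iff_eq]; exact hne)]
    rfl
  · have hz := (sum_counts_zero_iff pos p1 p2).mpr hany
    rw [hz, hany]
    rfl

-- ===== VERDICT (by name: the statement is the Claim_ definition above) =====
theorem verloren_spec : Claim_equal_verloren := by
  intro pos p1 p2 _
  exact verloren_spec_aux pos p1 p2
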